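-- pv_equiv track=rewrite | github.com/yashkk07/PubMed_AST | app.py | parse_month
-- ===== SOURCE A (Python) =====
-- def parse_month(month_str):
--     """
--     Convert month string to numeric month value (1-12).
--     Handles numeric strings, full month names, and abbreviations.
--     """
--     if not month_str:
--         return "1"  # Default to January if no month
--
--     # If already numeric
--     if month_str.isdigit():
--         month_num = int(month_str)
--         if 1 <= month_num <= 12:
--             return str(month_num)
--
--     # If it's a text month name
--     month_str = month_str.strip().lower()
--     month_map = {
--         'jan': '1', 'january': '1',
--         'feb': '2', 'february': '2',
--         'mar': '3', 'march': '3',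
--         'apr': '4', 'april': '4',
--         'may': '5',
--         'jun': '6', 'june': '6',
--         'jul': '7', 'july': '7',
--         'aug': '8', 'august': '8',
--         'sep': '9', 'september': '9', 'sept': '9',
--         'oct': '10', 'october': '10',
--         'nov': '11', 'november': '11',
--         'dec': '12', 'december': '12'
--     }
--
--     for abbr, num in month_map.items():
--         if month_str.startswith(abbr):
--             return num
--
--     # If we couldn't determine the month, default to January
--     return "1"
-- ===== SOURCE B (Python) =====
-- _MONTHS = {
--     'jan': '1', 'feb': '2', 'mar': '3', 'apr': '4', 'may': '5', 'jun': '6',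
--     'jul': '7', 'aug': '8', 'sep': '9', 'oct': '10', 'nov': '11', 'dec': '12',
-- }
--
-- def parse_month(month_str):
--     """
--     Convert month string to numeric month value (1-12).
--     Handles numeric strings, full month names, and abbreviations.
--     """
--     if not month_str:
--         return "1"
--     if month_str.isdigit():
--         month_num = int(month_str)
--         if 1 <= month_num <= 12:
--             return str(month_num)
--     return _MONTHS.get(month_str.strip().lower()[:3], "1")
-- ===== Notes on version B (the rewrite author's own statement) =====
-- stated objective: simpler
-- what changed: Replaces the 23-entry map and the first-match startswith scan by a single dict lookup keyed on the first three characters of the stripped, lowercased input; the full-name keys are redundant because each shares its distinct 3-letter prefix with an earlier key.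
import Mathlib
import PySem

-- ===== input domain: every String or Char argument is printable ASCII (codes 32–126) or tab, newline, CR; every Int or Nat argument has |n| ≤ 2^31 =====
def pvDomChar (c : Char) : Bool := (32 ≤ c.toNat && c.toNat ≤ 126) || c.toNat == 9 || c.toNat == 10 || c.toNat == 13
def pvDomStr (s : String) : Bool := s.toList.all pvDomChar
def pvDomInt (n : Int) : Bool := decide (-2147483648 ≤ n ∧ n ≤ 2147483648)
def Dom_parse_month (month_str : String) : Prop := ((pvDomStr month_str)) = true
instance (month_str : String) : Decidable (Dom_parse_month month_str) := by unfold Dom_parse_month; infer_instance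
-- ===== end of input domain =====

-- B replaces the 23-entry map and first-match startswith scan by one dict lookup on the
-- first three characters of the stripped lowercased input (objective: simpler).

-- ===== PORT A =====
def pvDigitCase (s : String) : Option String :=
  if PySem.Str.strIsdigit s then
    match PySem.Int.ofStr? s with
    | some n => if 1 ≤ n ∧ n ≤ 12 then some (PySem.Int.toStr n) else none
    | none => none  -- unreachable on Dom: isdigit strings parse as int
  else none

def pvMonthMapA : List (String × String) := [("jan", "1"), ("january", "1"), ("feb", "2"), ("february", "2"), ("mar", "3"), ("march", "3"), ("apr", "4"), ("april", "4"), ("may", "5"), ("jun", "6"), ("june", "6"), ("jul", "7"), ("july", "7"), ("aug", "8"), ("august", "8"), ("sep", "9"), ("september", "9"), ("sept", "9"), ("oct", "10"), ("october", "10"), ("nov", "11"), ("november", "11"), ("dec", "12"), ("december", "12")]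

def pvMonthLoop : List (String × String) → String → String
  | [], _ => "1"
  | (abbr, num) :: rest, t => if PySem.Str.startswith t abbr then num else pvMonthLoop rest t

def parse_month (month_str : String) : String :=
  if month_str = "" then "1"
  else
    match pvDigitCase month_str with
    | some r => r
    | none => pvMonthLoop pvMonthMapA (PySem.Str.lower (PySem.Str.strip month_str))

-- ===== PORT B =====
def pvMonthMap3 : PySem.Dict String String := PySem.Dict.ofList [("jan", "1"), ("feb", "2"), ("mar", "3"), ("apr", "4"), ("may", "5"), ("jun", "6"), ("jul", "7"), ("aug", "8"), ("sep", "9"), ("oct", "10"), ("nov", "11"), ("dec", "12")]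

def parse_month_alt (month_str : String) : String :=
  if month_str = "" then "1"
  else
    match pvDigitCase month_str with
    | some r => r
    | none =>
        PySem.Dict.getD pvMonthMap3
          (PySem.Str.slice (PySem.Str.lower (PySem.Str.strip month_str)) none (some 3)) "1"

-- ===== PRECONDITION & SPEC =====
def Spec_parse_month (month_str : String) (out : String) : Prop := out = parse_month_alt month_str
instance (month_str : String) (out : String) : Decidable (Spec_parse_month month_str out) := by unfold Spec_parse_month; infer_instance

-- ===== CLAIM (what is proved, stated in full; the proofs are below) =====
def Claim_equal_parse_month : Prop := ∀ (month_str : String), Dom_parse_month month_str → Spec_parse_month month_str (parse_month month_str)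

-- ===== LEMMAS AND PROOFS =====
lemma pvLoop_eq (t : String) :
    pvMonthLoop pvMonthMapA t = PySem.Dict.getD pvMonthMap3 (PySem.Str.slice t none (some 3)) "1" := by
  have hsl : (PySem.Str.slice t none (some 3)).toList = t.toList.take 3 := by
    simp [PySem.Str.toList_slice]
    rw [PySem.List.slice_to _ (by norm_num)]
    rfl
  have h3 : ∀ a : String, a.toList.length = 3 →
      (PySem.Str.startswith t a = true ↔ PySem.Str.slice t none (some 3) = a) := by
    intro a ha
    have hp : (PySem.Str.startswith t a = true) ↔ a.toList <+: t.toList := by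
      simp [PySem.Chars.startswith_iff]
    rw [hp, List.prefix_iff_eq_take, ha, ← String.toList_inj, hsl, eq_comm]
  have hlong : ∀ a b : String, a.toList <+: b.toList →
      PySem.Str.startswith t a = false → PySem.Str.startswith t b = false := by
    intro a b hab ha
    rw [Bool.eq_false_iff] at ha ⊢
    intro hb
    exact ha (by simp [PySem.Chars.startswith_iff] at hb ⊢; exact hab.trans hb)
  have hmk : pvMonthMap3 = PySem.Dict.mk [("jan", "1"), ("feb", "2"), ("mar", "3"), ("apr", "4"), ("may", "5"), ("jun", "6"), ("jul", "7"), ("aug", "8"), ("sep", "9"), ("oct", "10"), ("nov", "11"), ("dec", "12")] := by decide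
  by_cases q1 : PySem.Str.slice t none (some 3) = "jan"
  · have s1 : PySem.Str.startswith t "jan" = true := (h3 "jan" (by decide)).mpr q1
    simp only [pvMonthLoop, pvMonthMapA, s1, if_true, if_false, Bool.false_eq_true, ite_false, ite_true]
    rw [q1]
    decide
  · have s1 : PySem.Str.startswith t "jan" = false :=
      Bool.eq_false_iff.mpr (fun h => q1 ((h3 "jan" (by decide)).mp h))
    have s1l0 : PySem.Str.startswith t "january" = false := hlong "jan" "january" (by decide) s1
    by_cases q2 : PySem.Str.slice t none (some 3) = "feb"
    · have s2 : PySem.Str.startswith t "feb" = true := (h3 "feb" (by decide)).mpr q2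
      simp only [pvMonthLoop, pvMonthMapA, s1, s1l0, s2, if_true, if_false, Bool.false_eq_true, ite_false, ite_true]
      rw [q2]
      decide
    · have s2 : PySem.Str.startswith t "feb" = false :=
        Bool.eq_false_iff.mpr (fun h => q2 ((h3 "feb" (by decide)).mp h))
      have s2l0 : PySem.Str.startswith t "february" = false := hlong "feb" "february" (by decide) s2
      by_cases q3 : PySem.Str.slice t none (some 3) = "mar"
      · have s3 : PySem.Str.startswith t "mar" = true := (h3 "mar" (by decide)).mpr q3
        simp only [pvMonthLoop, pvMonthMapA, s1, s1l0, s2, s2l0, s3, if_true, if_false, Bool.false_eq_true, ite_false, ite_true]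
        rw [q3]
        decide
      · have s3 : PySem.Str.startswith t "mar" = false :=
          Bool.eq_false_iff.mpr (fun h => q3 ((h3 "mar" (by decide)).mp h))
        have s3l0 : PySem.Str.startswith t "march" = false := hlong "mar" "march" (by decide) s3
        by_cases q4 : PySem.Str.slice t none (some 3) = "apr"
        · have s4 : PySem.Str.startswith t "apr" = true := (h3 "apr" (by decide)).mpr q4
          simp only [pvMonthLoop, pvMonthMapA, s1, s1l0, s2, s2l0, s3, s3l0, s4, if_true, if_false, Bool.false_eq_true, ite_false, ite_true]
          rw [q4]
          decide
        · have s4 : PySem.Str.startswith t "apr" = false :=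
            Bool.eq_false_iff.mpr (fun h => q4 ((h3 "apr" (by decide)).mp h))
          have s4l0 : PySem.Str.startswith t "april" = false := hlong "apr" "april" (by decide) s4
          by_cases q5 : PySem.Str.slice t none (some 3) = "may"
          · have s5 : PySem.Str.startswith t "may" = true := (h3 "may" (by decide)).mpr q5
            simp only [pvMonthLoop, pvMonthMapA, s1, s1l0, s2, s2l0, s3, s3l0, s4, s4l0, s5, if_true, if_false, Bool.false_eq_true, ite_false, ite_true]
            rw [q5]
            decide
          · have s5 : PySem.Str.startswith t "may" = false :=
              Bool.eq_false_iff.mpr (fun h => q5 ((h3 "may" (by decide)).mp h))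
            by_cases q6 : PySem.Str.slice t none (some 3) = "jun"
            · have s6 : PySem.Str.startswith t "jun" = true := (h3 "jun" (by decide)).mpr q6
              simp only [pvMonthLoop, pvMonthMapA, s1, s1l0, s2, s2l0, s3, s3l0, s4, s4l0, s5, s6, if_true, if_false, Bool.false_eq_true, ite_false, ite_true]
              rw [q6]
              decide
            · have s6 : PySem.Str.startswith t "jun" = false :=
                Bool.eq_false_iff.mpr (fun h => q6 ((h3 "jun" (by decide)).mp h))
              have s6l0 : PySem.Str.startswith t "june" = false := hlong "jun" "june" (by decide) s6
              by_cases q7 : PySem.Str.slice t none (some 3) = "jul"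
              · have s7 : PySem.Str.startswith t "jul" = true := (h3 "jul" (by decide)).mpr q7
                simp only [pvMonthLoop, pvMonthMapA, s1, s1l0, s2, s2l0, s3, s3l0, s4, s4l0, s5, s6, s6l0, s7, if_true, if_false, Bool.false_eq_true, ite_false, ite_true]
                rw [q7]
                decide
              · have s7 : PySem.Str.startswith t "jul" = false :=
                  Bool.eq_false_iff.mpr (fun h => q7 ((h3 "jul" (by decide)).mp h))
                have s7l0 : PySem.Str.startswith t "july" = false := hlong "jul" "july" (by decide) s7
                by_cases q8 : PySem.Str.slice t none (some 3) = "aug"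
                · have s8 : PySem.Str.startswith t "aug" = true := (h3 "aug" (by decide)).mpr q8
                  simp only [pvMonthLoop, pvMonthMapA, s1, s1l0, s2, s2l0, s3, s3l0, s4, s4l0, s5, s6, s6l0, s7, s7l0, s8, if_true, if_false, Bool.false_eq_true, ite_false, ite_true]
                  rw [q8]
                  decide
                · have s8 : PySem.Str.startswith t "aug" = false :=
                    Bool.eq_false_iff.mpr (fun h => q8 ((h3 "aug" (by decide)).mp h))
                  have s8l0 : PySem.Str.startswith t "august" = false := hlong "aug" "august" (by decide) s8
                  by_cases q9 : PySem.Str.slice t none (some 3) = "sep"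
                  · have s9 : PySem.Str.startswith t "sep" = true := (h3 "sep" (by decide)).mpr q9
                    simp only [pvMonthLoop, pvMonthMapA, s1, s1l0, s2, s2l0, s3, s3l0, s4, s4l0, s5, s6, s6l0, s7, s7l0, s8, s8l0, s9, if_true, if_false, Bool.false_eq_true, ite_false, ite_true]
                    rw [q9]
                    decide
                  · have s9 : PySem.Str.startswith t "sep" = false :=
                      Bool.eq_false_iff.mpr (fun h => q9 ((h3 "sep" (by decide)).mp h))
                    have s9l0 : PySem.Str.startswith t "september" = false := hlong "sep" "september" (by decide) s9
                    have s9l1 : PySem.Str.startswith t "sept" = false := hlong "sep" "sept" (by decide) s9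
                    by_cases q10 : PySem.Str.slice t none (some 3) = "oct"
                    · have s10 : PySem.Str.startswith t "oct" = true := (h3 "oct" (by decide)).mpr q10
                      simp only [pvMonthLoop, pvMonthMapA, s1, s1l0, s2, s2l0, s3, s3l0, s4, s4l0, s5, s6, s6l0, s7, s7l0, s8, s8l0, s9, s9l0, s9l1, s10, if_true, if_false, Bool.false_eq_true, ite_false, ite_true]
                      rw [q10]
                      decide
                    · have s10 : PySem.Str.startswith t "oct" = false :=
                        Bool.eq_false_iff.mpr (fun h => q10 ((h3 "oct" (by decide)).mp h))
                      have s10l0 : PySem.Str.startswith t "october" = false := hlong "oct" "october" (by decide) s10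
                      by_cases q11 : PySem.Str.slice t none (some 3) = "nov"
                      · have s11 : PySem.Str.startswith t "nov" = true := (h3 "nov" (by decide)).mpr q11
                        simp only [pvMonthLoop, pvMonthMapA, s1, s1l0, s2, s2l0, s3, s3l0, s4, s4l0, s5, s6, s6l0, s7, s7l0, s8, s8l0, s9, s9l0, s9l1, s10, s10l0, s11, if_true, if_false, Bool.false_eq_true, ite_false, ite_true]
                        rw [q11]
                        decide
                      · have s11 : PySem.Str.startswith t "nov" = false :=
                          Bool.eq_false_iff.mpr (fun h => q11 ((h3 "nov" (by decide)).mp h))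
                        have s11l0 : PySem.Str.startswith t "november" = false := hlong "nov" "november" (by decide) s11
                        by_cases q12 : PySem.Str.slice t none (some 3) = "dec"
                        · have s12 : PySem.Str.startswith t "dec" = true := (h3 "dec" (by decide)).mpr q12
                          simp only [pvMonthLoop, pvMonthMapA, s1, s1l0, s2, s2l0, s3, s3l0, s4, s4l0, s5, s6, s6l0, s7, s7l0, s8, s8l0, s9, s9l0, s9l1, s10, s10l0, s11, s11l0, s12, if_true, if_false, Bool.false_eq_true, ite_false, ite_true]
                          rw [q12]
                          decide
                        · have s12 : PySem.Str.startswith t "dec" = false :=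
                            Bool.eq_false_iff.mpr (fun h => q12 ((h3 "dec" (by decide)).mp h))
                          have s12l0 : PySem.Str.startswith t "december" = false := hlong "dec" "december" (by decide) s12
                          simp only [pvMonthLoop, pvMonthMapA, s1, s1l0, s2, s2l0, s3, s3l0, s4, s4l0, s5, s6, s6l0, s7, s7l0, s8, s8l0, s9, s9l0, s9l1, s10, s10l0, s11, s11l0, s12, s12l0, Bool.false_eq_true, ite_false]
                          rw [hmk]
                          simp [PySem.Dict.getD, PySem.Dict.get?_mk_cons, PySem.Dict.get?, Ne.symm q1, Ne.symm q2, Ne.symm q3, Ne.symm q4, Ne.symm q5, Ne.symm q6, Ne.symm q7, Ne.symm q8, Ne.symm q9, Ne.symm q10, Ne.symm q11, Ne.symm q12]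

-- ===== VERDICT (by name: the statement is the Claim_ definition above) =====
theorem parse_month_spec : Claim_equal_parse_month := by
  intro t _
  unfold Spec_parse_month parse_month parse_month_alt
  by_cases ht : t = ""
  · simp [ht]
  · simp only [ht, if_false, ite_false]
    cases pvDigitCase t with
    | some r => rfl
    | none => exact pvLoop_eq _
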